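-- pv_equiv track=rewrite | github.com/mk070/ihub-pro | Backend/compile/additionals/cobol.py | extract_relevant_output
-- ===== SOURCE A (Python) =====
-- def extract_relevant_output(output):
--     lines = output.splitlines()
--     relevant_lines = []
--     capture = False
--
--     for line in lines:
--         # Start capturing if the line resembles a table header or has columns
--         if capture or ("ID" in line and "First" in line):
--             capture = True
--             relevant_lines.append(line)
--         # Stop capturing at the end of data (when a blank line follows data)
--         elif capture and not line.strip():
--             break
--
--     # Fallback in case no structured data was captured
--     if not relevant_lines:
--         relevant_lines = ["No relevant output found."]
--
--     return "\n".join(relevant_lines)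
-- ===== SOURCE B (Python) =====
-- def extract_relevant_output(output):
--     result = None
--     suffix = None
--     for line in reversed(output.splitlines()):
--         suffix = line if suffix is None else line + "\n" + suffix
--         if "ID" in line and "First" in line:
--             result = suffix
--     return result if result is not None else "No relevant output found."
-- ===== Notes on version B (the rewrite author's own statement) =====
-- stated objective: alternative
-- what changed: Replaces A's forward flag-loop that accumulates a list of lines and joins at the end by a single backward pass over reversed(lines) that incrementally builds the joined suffix string and records it whenever a header line is seen (the last recording is the first header); no list accumulation, no slicing, no final join.
import Mathlib
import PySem

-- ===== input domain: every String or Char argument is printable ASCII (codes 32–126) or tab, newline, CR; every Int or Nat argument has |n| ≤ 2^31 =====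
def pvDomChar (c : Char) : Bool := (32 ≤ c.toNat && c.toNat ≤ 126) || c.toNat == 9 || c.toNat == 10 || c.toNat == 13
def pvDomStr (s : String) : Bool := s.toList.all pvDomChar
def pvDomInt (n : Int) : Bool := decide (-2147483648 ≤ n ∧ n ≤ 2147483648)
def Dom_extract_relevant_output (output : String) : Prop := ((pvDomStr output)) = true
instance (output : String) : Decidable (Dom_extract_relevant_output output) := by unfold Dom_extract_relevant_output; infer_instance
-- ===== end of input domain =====

-- B replaces A's forward flag-loop + final join by one backward pass that builds the joined suffix incrementally (alternative; same cost).

-- ===== PORT A =====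
-- A's for-loop over lines with state (capture, relevant_lines); the elif is the break branch.
def pvLoopA : List String → Bool → List String → List String
  | [], _, acc => acc
  | l :: ls, capture, acc =>
    if capture || (PySem.Str.isIn "ID" l && PySem.Str.isIn "First" l) then
      pvLoopA ls true (acc ++ [l])
    else if capture && (PySem.Str.strip l == "") then
      acc  -- break
    else
      pvLoopA ls capture acc

def extract_relevant_output (output : String) : String :=
  let lines := PySem.Str.splitlines output
  let relevant_lines := pvLoopA lines false []
  let relevant_lines := if relevant_lines = [] then ["No relevant output found."] else relevant_lines
  PySem.Str.join "\n" relevant_lines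

-- ===== PORT B =====
-- Source B's 'for line in reversed(lines)' loop with state (result, suffix)
def pvStepB (st : Option String × Option String) (line : String) : Option String × Option String :=
  let suffix := match st.2 with
    | none => line
    | some s => line ++ "\n" ++ s
  let result := if PySem.Str.isIn "ID" line && PySem.Str.isIn "First" line then some suffix else st.1
  (result, some suffix)

def extract_relevant_output_alt (output : String) : String :=
  let lines := PySem.Str.splitlines output
  let st := lines.reverse.foldl pvStepB (none, none)
  match st.1 with
  | none => "No relevant output found."
  | some s => s

-- ===== PRECONDITION & SPEC =====
def Spec_extract_relevant_output (output : String) (out : String) : Prop := out = extract_relevant_output_alt output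
instance (output : String) (out : String) : Decidable (Spec_extract_relevant_output output out) := by unfold Spec_extract_relevant_output; infer_instance

-- ===== CLAIM (what is proved, stated in full; the proofs are below) =====
def Claim_equal_extract_relevant_output : Prop := ∀ (output : String), Dom_extract_relevant_output output → Spec_extract_relevant_output output (extract_relevant_output output)

-- ===== LEMMAS AND PROOFS =====

def pvHeader (l : String) : Bool := PySem.Str.isIn "ID" l && PySem.Str.isIn "First" l

-- once capturing, A appends every remaining line
theorem pvLoopA_true (ls : List String) (acc : List String) : pvLoopA ls true acc = acc ++ ls := by
  induction ls generalizing acc with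
  | nil => simp [pvLoopA]
  | cons l ls ih => simp [pvLoopA, ih]

-- before capturing, A's loop is exactly find-then-tail
theorem pvLoopA_false (ls : List String) (acc : List String) :
    pvLoopA ls false acc = acc ++ (match ls.findIdx? pvHeader with
      | none => []
      | some i => ls.drop i) := by
  induction ls generalizing acc with
  | nil => simp [pvLoopA]
  | cons l ls ih =>
    have hc : (PySem.Str.isIn "ID" l && PySem.Str.isIn "First" l) = pvHeader l := rfl
    simp only [pvLoopA, Bool.false_or, Bool.false_and, hc, List.findIdx?_cons]
    by_cases h : pvHeader l = true
    · rw [if_pos h, if_pos h, pvLoopA_true]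
      simp
    · rw [if_neg h, if_neg h, if_neg (by simp), ih]
      cases hf : ls.findIdx? pvHeader with
      | none => simp
      | some i => simp

-- String concatenation through String.ofList
theorem pvCat (a : String) (cs : List Char) : a ++ String.ofList cs = String.ofList (a.toList ++ cs) := by
  simp

theorem pvJoinOne (l : String) : PySem.Str.join "\n" [l] = l := by
  simp [PySem.Str.join, PySem.Chars.join_singleton]

theorem pvJoinCons (l m : String) (ms : List String) :
    l ++ "\n" ++ PySem.Str.join "\n" (m :: ms) = PySem.Str.join "\n" (l :: m :: ms) := by
  simp only [PySem.Str.join, PySem.Chars.join_cons_cons, List.map_cons]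
  rw [String.append_assoc, show ("\n" : String) = String.ofList ['\n'] from rfl, pvCat, pvCat]
  simp

-- B's backward pass computed as a foldr, characterised: second component is the joined
-- suffix, first component is the joined tail from the first header line
theorem pvFoldB (ls : List String) :
    ls.foldr (fun line st => pvStepB st line) (none, none) =
      ((ls.findIdx? pvHeader).map (fun i => PySem.Str.join "\n" (ls.drop i)),
       if ls = [] then none else some (PySem.Str.join "\n" ls)) := by
  induction ls with
  | nil => simp
  | cons l ls ih =>
    rw [List.foldr_cons, ih]
    have hc : (PySem.Str.isIn "ID" l && PySem.Str.isIn "First" l) = pvHeader l := rfl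
    simp only [pvStepB]
    rw [hc]
    cases ls with
    | nil =>
      by_cases h : pvHeader l = true <;>
        simp [h, List.findIdx?_cons, pvJoinOne]
    | cons m ms =>
      by_cases h : pvHeader l = true
      · simp [h, List.findIdx?_cons, pvJoinCons]
      · simp only [h, if_false, Bool.false_eq_true, reduceCtorEq]
        refine Prod.ext ?_ (by simp [pvJoinCons])
        conv_rhs => rw [List.findIdx?_cons]
        simp only [h, Bool.false_eq_true, ite_false]
        cases hf : (m :: ms).findIdx? pvHeader <;> simp

-- ===== VERDICT (by name: the statement is the Claim_ definition above) =====
theorem extract_relevant_output_spec : Claim_equal_extract_relevant_output := by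
  intro output _
  unfold Spec_extract_relevant_output extract_relevant_output extract_relevant_output_alt
  dsimp only
  rw [List.foldl_reverse]
  simp only [pvLoopA_false, List.nil_append, pvFoldB]
  cases hf : (PySem.Str.splitlines output).findIdx? pvHeader with
  | none => simp [PySem.Str.join]
  | some i =>
    have hi : i < (PySem.Str.splitlines output).length := (List.findIdx?_eq_some_iff_findIdx_eq.mp hf).1
    simp only [Option.map_some]
    rw [if_neg (by simp [List.drop_eq_nil_iff]; omega)]
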